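-- pv_equiv track=rewrite | github.com/godzz733/Algorithm-study | 프로그래머스/lv1/17681. ［1차］ 비밀지도/［1차］ 비밀지도.py | solution
-- ===== SOURCE A (Python) =====
-- def solution(n, arr1, arr2):
--     arr1_li = []
--     arr2_li = []
--     result = [[] for _ in range(n)]
--     arr1_t = [[] for _ in range(n)]
--     arr2_t = [[] for _ in range(n)]
--     for i in range(n):
--         a = format(arr1[i], 'b')
--         arr1_li.append(a.zfill(n))
--     for i in range(n):
--         a = format(arr2[i], 'b')
--         arr2_li.append(a.zfill(n))
--     for i in range(n):
--         for k in range(n):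
--             if arr1_li[i][k]=='0':
--                 arr1_t[i].append('0')
--             else:
--                 arr1_t[i].append('#')
--     for i in range(n):
--         for k in range(n):
--             if arr2_li[i][k]=='0':
--                 arr2_t[i].append('0')
--             else:
--                 arr2_t[i].append('#')
--     for i in range(n):
--         for k in range(n):
--             if arr1_t[i][k]=='0' and arr2_t[i][k]=='0':
--                 result[i].append(' ')
--             elif arr1_t[i][k]=='#' or arr2_t[i][k]=='#':
--                 result[i].append('#')
--     answer = list(map(''.join, result))
--
--     return answer
-- ===== SOURCE B (Python) =====
-- def solution(n, arr1, arr2):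
--     table = str.maketrans('10', '# ')
--     return [format(arr1[i] | arr2[i], 'b').zfill(n).translate(table)
--             for i in range(n)]
-- ===== Notes on version B (the rewrite author's own statement) =====
-- stated objective: simpler
-- what changed: B ORs the two numbers at the integer level and renders each row once (format/zfill/translate) in a single comprehension, instead of A's five separate loops building two zero-padded string lists, two '#'/'0' char-matrix copies, and a char-by-char OR pass.
-- outside the precondition, e.g. on solution(1, [2], [0]): A returns ['#'], B returns ['# ']; on solution(1, [-1], [0]): A returns ['#'], B returns ['-#']
import Mathlib
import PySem

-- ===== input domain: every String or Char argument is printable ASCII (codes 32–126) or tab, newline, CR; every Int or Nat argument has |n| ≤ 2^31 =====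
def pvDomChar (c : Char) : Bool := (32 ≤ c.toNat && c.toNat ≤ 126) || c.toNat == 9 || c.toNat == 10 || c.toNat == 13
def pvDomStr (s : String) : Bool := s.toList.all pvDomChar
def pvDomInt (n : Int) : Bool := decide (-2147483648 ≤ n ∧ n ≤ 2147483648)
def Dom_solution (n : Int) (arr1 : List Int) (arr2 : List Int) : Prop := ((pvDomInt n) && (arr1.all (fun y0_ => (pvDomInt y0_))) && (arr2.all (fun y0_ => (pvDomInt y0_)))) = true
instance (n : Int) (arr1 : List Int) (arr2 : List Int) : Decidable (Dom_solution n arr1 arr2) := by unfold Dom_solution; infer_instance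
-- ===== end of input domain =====

-- B renders each row once from the integer OR of the two row numbers instead of A's
-- five loops with two intermediate '#'/'0' char matrices (objective: simpler).

-- ===== PORT A =====
def solution (n : Int) (arr1 : List Int) (arr2 : List Int) : List String :=
  let nn := n.toNat
  -- first two loops: binary strings, zero-filled to width n
  let arr1_li := (List.range nn).map (fun i => PySem.Chars.zfill (PySem.Int.toBinChars (arr1.getD i 0)) n)
  let arr2_li := (List.range nn).map (fun i => PySem.Chars.zfill (PySem.Int.toBinChars (arr2.getD i 0)) n)
  -- next two loops: translate each char to '0' / '#'
  let arr1_t := arr1_li.map (fun s => s.map (fun c => if c = '0' then '0' else '#'))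
  let arr2_t := arr2_li.map (fun s => s.map (fun c => if c = '0' then '0' else '#'))
  -- final double loop: char-wise OR into result
  let result := (List.range nn).map (fun i =>
    (List.range nn).foldl (fun acc k =>
      let c1 := (arr1_t.getD i []).getD k ' '
      let c2 := (arr2_t.getD i []).getD k ' '
      if c1 = '0' ∧ c2 = '0' then acc ++ [' ']
      else if c1 = '#' ∨ c2 = '#' then acc ++ ['#']
      else acc) [])
  result.map (fun cs => String.ofList cs)

-- ===== PORT B =====
-- str.translate with the table {'1'->'#', '0'->' '} (other chars unchanged)
def pvTrans (c : Char) : Char := if c = '1' then '#' else if c = '0' then ' ' else c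

def solution_alt (n : Int) (arr1 : List Int) (arr2 : List Int) : List String :=
  (List.range n.toNat).map (fun i =>
    let v := PySem.Int.bor (arr1.getD i 0) (arr2.getD i 0)
    String.ofList ((PySem.Chars.zfill (PySem.Int.toBinChars v) n).map pvTrans))

-- ===== PRECONDITION & SPEC =====
-- Pre_ excludes rows shorter than n (A raises IndexError) and row values outside
-- [0, 2^n), where the binary rendering is not n characters wide and no behaviour is
-- specified: A keeps only the first n characters (and renders '-' as '#'), while B
-- keeps the full rendering — both are accidents of the representation.
def Pre_solution (n : Int) (arr1 : List Int) (arr2 : List Int) : Prop :=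
  n ≤ (arr1.length : Int) ∧ n ≤ (arr2.length : Int) ∧
  (∀ x ∈ arr1.take n.toNat, 0 ≤ x ∧ PySem.Int.bitLength x ≤ n.toNat) ∧
  (∀ x ∈ arr2.take n.toNat, 0 ≤ x ∧ PySem.Int.bitLength x ≤ n.toNat)
instance (n : Int) (arr1 : List Int) (arr2 : List Int) : Decidable (Pre_solution n arr1 arr2) := by
  unfold Pre_solution; infer_instance

def pvWitness_solution : Int × List Int × List Int := (2, [1, 2], [2, 1])

def Spec_solution (n : Int) (arr1 : List Int) (arr2 : List Int) (out : List String) : Prop := out = solution_alt n arr1 arr2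
instance (n : Int) (arr1 : List Int) (arr2 : List Int) (out : List String) : Decidable (Spec_solution n arr1 arr2 out) := by unfold Spec_solution; infer_instance

-- ===== CLAIM (what is proved, stated in full; the proofs are below) =====
def Claim_equal_solution : Prop := ∀ (n : Int) (arr1 : List Int) (arr2 : List Int), Dom_solution n arr1 arr2 → Pre_solution n arr1 arr2 → Spec_solution n arr1 arr2 (solution n arr1 arr2)

-- ===== LEMMAS AND PROOFS =====

-- binary digits, most significant first; pvMyBin n = Nat.toDigits 2 n
def pvMyBin (x : Nat) : List Char :=
  if _h : x < 2 then [Nat.digitChar x]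
  else pvMyBin (x / 2) ++ [Nat.digitChar (x % 2)]
  decreasing_by exact Nat.div_lt_self (by omega) (by omega)

lemma pvToDigitsCore_eq (fuel x : Nat) (ds : List Char) (h : x < fuel) :
    Nat.toDigitsCore 2 fuel x ds = pvMyBin x ++ ds := by
  induction fuel generalizing x ds with
  | zero => omega
  | succ fuel ih =>
    rw [Nat.toDigitsCore]
    by_cases h2 : x / 2 = 0
    · have hx : x < 2 := by omega
      simp [h2, pvMyBin, hx, Nat.mod_eq_of_lt hx]
    · have hx : ¬ x < 2 := by omega
      simp only [h2]
      rw [ih (x / 2) _ (by omega)]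
      conv_rhs => rw [pvMyBin, dif_neg hx]
      simp

lemma pvToDigits_eq_myBin (x : Nat) : Nat.toDigits 2 x = pvMyBin x := by
  unfold Nat.toDigits
  rw [pvToDigitsCore_eq x.succ x [] (Nat.lt_succ_self x)]
  simp

lemma pvMyBin_head (x : Nat) : ∃ c, (pvMyBin x).head? = some c ∧ (c = '0' ∨ c = '1') := by
  induction x using Nat.strong_induction_on with
  | _ x ih =>
    rw [pvMyBin]
    by_cases h : x < 2
    · interval_cases x <;> simp [Nat.digitChar]
    · obtain ⟨c, hc, hor⟩ := ih (x / 2) (Nat.div_lt_self (by omega) (by omega))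
      refine ⟨c, ?_, hor⟩
      simp [h, List.head?_append, hc]

-- zfill on a pure-digit string is a plain left pad
def pvPad (m x : Nat) : List Char :=
  List.replicate (m - (pvMyBin x).length) '0' ++ pvMyBin x

lemma pvZfill_eq_pad (m : Nat) (x : Nat) :
    PySem.Chars.zfill (pvMyBin x) (m : Int) = pvPad m x := by
  obtain ⟨c, hc, hor⟩ := pvMyBin_head x
  unfold PySem.Chars.zfill pvPad
  cases hb : pvMyBin x with
  | nil => simp [hb] at hc
  | cons d rest =>
    rw [hb] at hc; simp at hc; subst hc
    by_cases hle : (m : Int) ≤ ((d :: rest).length : Int)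
    · have h0 : m - (rest.length + 1) = 0 := by simp at hle; omega
      simp only [List.length_cons] at hle ⊢
      rw [if_pos (by push_cast at hle ⊢; omega), h0]
      simp
    · have hd : ¬ (d = '+' ∨ d = '-') := by rcases hor with h | h <;> subst h <;> decide
      have hm : (m : Int).toNat = m := rfl
      simp only [List.length_cons] at hle ⊢
      rw [if_neg (by push_cast at hle ⊢; omega), if_neg hd, hm]

lemma pvMyBin_lt_two (x : Nat) (h : x < 2) : pvMyBin x = [Nat.digitChar x] := by
  rw [pvMyBin]; simp [h]

lemma pvPad_succ (m x : Nat) (hm : 1 ≤ m) :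
    pvPad (m + 1) x = pvPad m (x / 2) ++ [Nat.digitChar (x % 2)] := by
  by_cases h : x < 2
  · have hx2 : x / 2 = 0 := by omega
    have hxm : x % 2 = x := by omega
    rw [pvPad, pvPad, pvMyBin_lt_two x h, hx2, hxm, pvMyBin_lt_two 0 (by omega)]
    have hrep : (List.replicate (m - 1) '0' ++ ['0'] : List Char) = List.replicate m '0' := by
      rw [← List.replicate_succ']
      congr 1
      omega
    simp only [List.length_singleton, show Nat.digitChar 0 = '0' from rfl,
      show m + 1 - 1 = m from rfl]
    rw [hrep]
  · conv_lhs => rw [pvPad, pvMyBin, dif_neg h]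
    rw [pvPad]
    have : (pvMyBin (x / 2) ++ [Nat.digitChar (x % 2)]).length = (pvMyBin (x / 2)).length + 1 := by
      simp
    rw [this]
    have harith : m + 1 - ((pvMyBin (x / 2)).length + 1) = m - (pvMyBin (x / 2)).length := by omega
    rw [harith, List.append_assoc]

lemma pvPad_bits (m x : Nat) (h : x < 2 ^ (m + 1)) :
    pvPad (m + 1) x = (List.range (m + 1)).map (fun j => if x.testBit (m - j) then '1' else '0') := by
  induction m generalizing x with
  | zero =>
    have : x < 2 := by omega
    rw [pvPad, pvMyBin_lt_two x this]
    interval_cases x <;> simp <;> rfl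
  | succ m ih =>
    rw [pvPad_succ (m + 1) x (by omega)]
    have hq : x / 2 < 2 ^ (m + 1) := by
      rw [pow_succ] at h
      omega
    rw [ih (x / 2) hq]
    conv_rhs => rw [List.range_succ, List.map_append]
    congr 1
    · apply List.map_congr_left
      intro j hj
      simp only [List.mem_range] at hj
      rw [show m + 1 - j = (m - j) + 1 from by omega, Nat.testBit_add_one]
    · simp only [List.map_cons, List.map_nil, show m + 1 - (m + 1) = 0 from by omega]
      rcases Nat.mod_two_eq_zero_or_one x with h2 | h2 <;>
        simp [Nat.testBit_zero, h2, Nat.digitChar]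

-- the char-wise OR loop of A, as a map
lemma pvFoldlRow (l : List Nat) (c1 c2 : Nat → Char) (acc : List Char)
    (h : ∀ k ∈ l, (c1 k = '0' ∨ c1 k = '#') ∧ (c2 k = '0' ∨ c2 k = '#')) :
    l.foldl (fun acc k =>
      if c1 k = '0' ∧ c2 k = '0' then acc ++ [' ']
      else if c1 k = '#' ∨ c2 k = '#' then acc ++ ['#']
      else acc) acc
    = acc ++ l.map (fun k => if c1 k = '0' ∧ c2 k = '0' then ' ' else '#') := by
  induction l generalizing acc with
  | nil => simp
  | cons x xs ih =>
    simp only [List.foldl_cons, List.map_cons]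
    obtain ⟨h1, h2⟩ := h x (by simp)
    by_cases hb : c1 x = '0' ∧ c2 x = '0'
    · rw [if_pos hb, if_pos hb, ih _ (fun k hk => h k (by simp [hk]))]
      simp
    · have hor : c1 x = '#' ∨ c2 x = '#' := by
        rcases h1 with h1 | h1 <;> rcases h2 with h2 | h2 <;> simp [h1, h2] at hb ⊢
      rw [if_neg hb, if_pos hor, if_neg hb, ih _ (fun k hk => h k (by simp [hk]))]
      simp

lemma pvGetD_map_range {α : Type} (f : Nat → α) (nn k : Nat) (d : α) (hk : k < nn) :
    ((List.range nn).map f).getD k d = f k := by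
  rw [List.getD_eq_getElem?_getD]
  simp [hk]

-- row-level equality, for one pair of in-range values
lemma pvRow_eq (m : Nat) (a b : Int) (ha0 : 0 ≤ a) (ha : a < (2 : Int) ^ (m + 1))
    (hb0 : 0 ≤ b) (hb : b < (2 : Int) ^ (m + 1)) (n : Int) (hn : n.toNat = m + 1) :
    (List.range (m + 1)).foldl (fun acc k =>
      let c1 := ((PySem.Chars.zfill (PySem.Int.toBinChars a) n).map
                   (fun c => if c = '0' then '0' else '#')).getD k ' '
      let c2 := ((PySem.Chars.zfill (PySem.Int.toBinChars b) n).map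
                   (fun c => if c = '0' then '0' else '#')).getD k ' '
      if c1 = '0' ∧ c2 = '0' then acc ++ [' ']
      else if c1 = '#' ∨ c2 = '#' then acc ++ ['#']
      else acc) []
    = (PySem.Chars.zfill (PySem.Int.toBinChars (PySem.Int.bor a b)) n).map pvTrans := by
  have hnat : ∀ x : Int, 0 ≤ x → x < (2 : Int) ^ (m + 1) → x.toNat < 2 ^ (m + 1) := by
    intro x hx0 hx
    have : ((x.toNat : Int)) < ((2 ^ (m + 1) : Nat) : Int) := by push_cast; omega
    exact_mod_cast this
  have hbin : ∀ x : Int, 0 ≤ x → x < (2 : Int) ^ (m + 1) →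
      PySem.Chars.zfill (PySem.Int.toBinChars x) n
        = (List.range (m + 1)).map (fun j => if x.toNat.testBit (m - j) then '1' else '0') := by
    intro x hx0 hx
    have hneg : ¬ x < 0 := by omega
    have hn' : n = ((m + 1 : Nat) : Int) := by omega
    rw [PySem.Int.toBinChars, if_neg hneg, pvToDigits_eq_myBin, hn', pvZfill_eq_pad]
    exact pvPad_bits m x.toNat (hnat x hx0 hx)
  -- the OR value
  have hor : PySem.Int.bor a b = ((a.toNat ||| b.toNat : Nat) : Int) :=
    PySem.Int.bor_of_nonneg ha0 hb0
  have horlt : (a.toNat ||| b.toNat) < 2 ^ (m + 1) :=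
    Nat.or_lt_two_pow (hnat a ha0 ha) (hnat b hb0 hb)
  have hORbin : PySem.Chars.zfill (PySem.Int.toBinChars (PySem.Int.bor a b)) n
      = (List.range (m + 1)).map
          (fun j => if (a.toNat ||| b.toNat).testBit (m - j) then '1' else '0') := by
    rw [hor, hbin ((a.toNat ||| b.toNat : Nat) : Int) (by positivity) (by
      have : (((a.toNat ||| b.toNat : Nat)) : Int) < ((2 ^ (m + 1) : Nat) : Int) := by
        exact_mod_cast horlt
      push_cast at this ⊢; omega)]
    simp
  rw [hbin a ha0 ha, hbin b hb0 hb, hORbin]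
  rw [List.map_map, List.map_map]
  rw [pvFoldlRow _ _ _ _ (by
    intro k hk
    rw [pvGetD_map_range _ _ _ _ (List.mem_range.mp hk),
      pvGetD_map_range _ _ _ _ (List.mem_range.mp hk)]
    constructor
    · rcases Bool.eq_false_or_eq_true (a.toNat.testBit (m - k)) with ht | ht <;>
        simp [Function.comp, ht]
    · rcases Bool.eq_false_or_eq_true (b.toNat.testBit (m - k)) with ht | ht <;>
        simp [Function.comp, ht])]
  rw [List.nil_append, List.map_map]
  apply List.map_congr_left
  intro k hk
  rw [pvGetD_map_range _ _ _ _ (List.mem_range.mp hk),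
    pvGetD_map_range _ _ _ _ (List.mem_range.mp hk)]
  simp only [Function.comp]
  rw [Nat.testBit_or]
  rcases Bool.eq_false_or_eq_true (a.toNat.testBit (m - k)) with hta | hta <;>
    rcases Bool.eq_false_or_eq_true (b.toNat.testBit (m - k)) with htb | htb <;>
      simp [hta, htb, pvTrans]

-- ===== VERDICT (by name: the statement is the Claim_ definition above) =====
theorem solution_spec : Claim_equal_solution := by
  intro n arr1 arr2 _hdom hpre
  unfold Spec_solution solution solution_alt
  simp only
  rw [List.map_map, List.map_map, List.map_map]
  apply List.map_congr_left
  intro i hi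
  have him := List.mem_range.mp hi
  obtain ⟨hl1, hl2, hv1, hv2⟩ := hpre
  have hi1 : i < arr1.length := by omega
  have hi2 : i < arr2.length := by omega
  have hmem1 : arr1.getD i 0 ∈ arr1.take n.toNat := by
    have hti : i < (arr1.take n.toNat).length := by simp; omega
    rw [List.getD_eq_getElem arr1 0 hi1, ← List.getElem_take (i := i)]
    exact List.getElem_mem hti
  have hmem2 : arr2.getD i 0 ∈ arr2.take n.toNat := by
    have hti : i < (arr2.take n.toNat).length := by simp; omega
    rw [List.getD_eq_getElem arr2 0 hi2, ← List.getElem_take (i := i)]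
    exact List.getElem_mem hti
  have hbd : ∀ x : Int, 0 ≤ x → PySem.Int.bitLength x ≤ n.toNat → x < (2 : Int) ^ n.toNat := by
    intro x hx0 hbl
    have h1 : x.natAbs < 2 ^ PySem.Int.bitLength x := PySem.Int.lt_two_pow_bitLength x
    have h2 : (2 : Nat) ^ PySem.Int.bitLength x ≤ 2 ^ n.toNat := Nat.pow_le_pow_right (by omega) hbl
    have hc : ((x.natAbs : Int)) < ((2 ^ n.toNat : Nat) : Int) := by
      exact_mod_cast lt_of_lt_of_le h1 h2
    rw [Int.natAbs_of_nonneg hx0] at hc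
    push_cast at hc
    exact hc
  obtain ⟨ha0, hal⟩ := hv1 _ hmem1
  obtain ⟨hb0, hbl⟩ := hv2 _ hmem2
  have ha := hbd _ ha0 hal
  have hb := hbd _ hb0 hbl
  have hm : ∃ m, n.toNat = m + 1 := ⟨n.toNat - 1, by omega⟩
  obtain ⟨m, hmn⟩ := hm
  simp only [Function.comp]
  congr 1
  rw [pvGetD_map_range _ _ _ _ him, pvGetD_map_range _ _ _ _ him]
  rw [hmn] at ha hb ⊢
  exact pvRow_eq m _ _ ha0 ha hb0 hb n hmn
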